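-- pv_equiv track=rewrite | github.com/MrBrantCode/unitest_baseline | mut_generate/mist_train_cf/cf_78061/solution.py | compute
-- ===== SOURCE A (Python) =====
-- def compute(lst):
--     def is_prime(n):
--         """Helper function to check if a number is prime."""
--         if n < 2:
--             return False
--         for i in range(2, int(n ** 0.5) + 1):
--             if n % i == 0:
--                 return False
--         return True
--
--     primes = [num for num in lst if is_prime(num)]
--     if not primes:
--         return 0
--
--     smallest_prime = min(primes)
--     product = 1
--     while smallest_prime:
--         product *= smallest_prime % 10
--         smallest_prime //= 10
--
--     return product
-- ===== SOURCE B (Python) =====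
-- def compute(lst):
--     def is_prime(n):
--         """Helper function to check if a number is prime."""
--         if n < 2:
--             return False
--         for i in range(2, int(n ** 0.5) + 1):
--             if n % i == 0:
--                 return False
--         return True
--
--     def digit_product(n):
--         return 1 if n == 0 else digit_product(n // 10) * (n % 10)
--
--     for x in sorted(lst):
--         if is_prime(x):
--             return digit_product(x)
--     return 0
-- ===== Notes on version B (the rewrite author's own statement) =====
-- stated objective: alternative
-- what changed: Replaces 'primality-test every element, collect all primes, take min, accumulator while-loop over digits' by 'sort, early-exit scan returning at the first prime, recursive digit product'; often faster via the early exit, but that depends on where the smallest prime sits.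
import Mathlib
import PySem

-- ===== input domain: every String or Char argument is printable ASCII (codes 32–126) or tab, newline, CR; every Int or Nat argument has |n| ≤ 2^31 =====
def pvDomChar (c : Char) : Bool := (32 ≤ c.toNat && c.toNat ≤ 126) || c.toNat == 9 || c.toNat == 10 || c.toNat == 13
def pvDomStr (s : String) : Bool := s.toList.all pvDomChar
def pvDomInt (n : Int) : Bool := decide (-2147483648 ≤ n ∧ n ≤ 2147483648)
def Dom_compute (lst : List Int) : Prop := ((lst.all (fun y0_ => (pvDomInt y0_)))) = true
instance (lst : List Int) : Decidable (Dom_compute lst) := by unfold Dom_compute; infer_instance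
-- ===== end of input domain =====

-- B replaces "filter all primes, min, accumulator digit loop" by "sort, early-exit scan
-- for the first prime, recursive digit product" (objective: alternative shape, same cost).

-- ===== PORT A =====
-- is_prime helper, shared verbatim by both Pythons.  int(n ** 0.5) is ported as
-- Nat.sqrt n.toNat: exact for 0 ≤ n ≤ 2^31 (double sqrt never crosses an integer there);
-- the branch is only reached with 2 ≤ n, and on Dom n ≤ 2^31.
def pvIsPrime (n : Int) : Bool :=
  if n < 2 then false
  else (PySem.List.pyRange 2 ((Nat.sqrt n.toNat : Int) + 1) 1).all
         (fun i => !(PySem.Int.mod n i == 0))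

-- A's 'while smallest_prime: product *= smallest_prime % 10; smallest_prime //= 10'.
-- The guard is 'n ≤ 0' instead of 'n == 0' only for termination: it is reached solely
-- with n ≥ 2 (a prime) and n stays ≥ 0, where the two guards agree.
def pvWhileDigits (product n : Int) : Int :=
  if n ≤ 0 then product
  else pvWhileDigits (product * PySem.Int.mod n 10) (PySem.Int.floordiv n 10)
termination_by n.toNat
decreasing_by
  have h1 : PySem.Int.floordiv n 10 = n / 10 := PySem.Int.floordiv_eq_ediv_of_pos (by omega)
  rw [h1]; omega

def compute (lst : List Int) : Int :=
  let primes := lst.filter (fun num => pvIsPrime num)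
  -- min? is none exactly on the empty list: this match is 'if not primes: return 0' + min(primes)
  match PySem.List.min? primes (fun x => x) with
  | none => 0
  | some smallest => pvWhileDigits 1 smallest

-- ===== PORT B =====
-- B's 'digit_product(n) = 1 if n == 0 else digit_product(n // 10) * (n % 10)'.
-- Guard 'n ≤ 0' instead of 'n == 0' only for termination; called solely with n ≥ 2.
def pvDigitProduct (n : Int) : Int :=
  if n ≤ 0 then 1
  else pvDigitProduct (PySem.Int.floordiv n 10) * PySem.Int.mod n 10
termination_by n.toNat
decreasing_by
  have h1 : PySem.Int.floordiv n 10 = n / 10 := PySem.Int.floordiv_eq_ediv_of_pos (by omega)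
  rw [h1]; omega

-- 'for x in sorted(lst): if is_prime(x): return digit_product(x)' / 'return 0'
def pvScan : List Int → Int
  | [] => 0
  | x :: t => if pvIsPrime x then pvDigitProduct x else pvScan t

def compute_alt (lst : List Int) : Int :=
  pvScan (PySem.List.sorted lst (fun x => x) false)

-- ===== PRECONDITION & SPEC =====
def Spec_compute (lst : List Int) (out : Int) : Prop := out = compute_alt lst
instance (lst : List Int) (out : Int) : Decidable (Spec_compute lst out) := by unfold Spec_compute; infer_instance

-- ===== CLAIM (what is proved, stated in full; the proofs are below) =====
def Claim_equal_compute : Prop := ∀ (lst : List Int), Dom_compute lst → Spec_compute lst (compute lst)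

-- ===== LEMMAS AND PROOFS =====

-- A's accumulator while-loop equals B's plain recursion.
theorem pvWhileDigits_eq (product n : Int) :
    pvWhileDigits product n = product * pvDigitProduct n := by
  fun_induction pvWhileDigits product n with
  | case1 p n h => rw [pvDigitProduct]; simp [h]
  | case2 p n h ih =>
      rw [pvDigitProduct, if_neg h, ih]; ring

-- min? with key id is determined by the value: any permutation gives the same result.
theorem min?_id_perm {xs ys : List Int} (h : xs.Perm ys) :
    PySem.List.min? xs (fun x => x) = PySem.List.min? ys (fun x => x) := by
  cases hx : PySem.List.min? xs (fun x => x) with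
  | none =>
      rw [PySem.List.min?_eq_none_iff] at hx
      subst hx
      symm
      rw [PySem.List.min?_eq_none_iff]
      exact h.symm.eq_nil
  | some m =>
      cases hy : PySem.List.min? ys (fun x => x) with
      | none =>
          rw [PySem.List.min?_eq_none_iff] at hy
          subst hy
          have hxs : xs = [] := h.eq_nil
          subst hxs
          simp [PySem.List.min?] at hx
      | some m' =>
          have hm := PySem.List.min?_mem hx
          have hm' := PySem.List.min?_mem hy
          have h1 : m ≤ m' := PySem.List.min?_isMin hx m' (h.symm.mem_iff.mp hm')
          have h2 : m' ≤ m := PySem.List.min?_isMin hy m (h.mem_iff.mp hm)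
          rw [le_antisymm h1 h2]

-- On an ascending list, the early-exit scan computes the digit product of the minimum
-- of its prime elements (0 if there is none).
theorem pvScan_eq (s : List Int) (hp : s.Pairwise (· ≤ ·)) :
    pvScan s =
      match PySem.List.min? (s.filter (fun num => pvIsPrime num)) (fun x => x) with
      | none => 0
      | some m => pvDigitProduct m := by
  induction s with
  | nil => rfl
  | cons x t ih =>
      rcases List.pairwise_cons.mp hp with ⟨hle, ht⟩
      by_cases hx : pvIsPrime x
      · have hmin : PySem.List.min?
            ((x :: t).filter (fun num => pvIsPrime num)) (fun x => x) = some x := by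
          have hf : (x :: t).filter (fun num => pvIsPrime num)
              = x :: t.filter (fun num => pvIsPrime num) := by
            simp [hx]
          rw [hf, PySem.List.min?_id_cons]
          have hmem := PySem.List.foldl_min_mem (t.filter (fun num => pvIsPrime num)) x
          have hle2 := PySem.List.foldl_min_le (t.filter (fun num => pvIsPrime num)) x
          rcases hmem with heq | hmem
          · rw [heq]
          · have := hle _ (List.mem_of_mem_filter hmem)
            have h1 := hle2.1
            congr 1
            omega
        rw [hmin]
        simp [pvScan, hx]
      · have hf : (x :: t).filter (fun num => pvIsPrime num)
            = t.filter (fun num => pvIsPrime num) := by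
          simp [hx]
        rw [hf, ← ih ht]
        simp [pvScan, hx]

-- ===== VERDICT (by name: the statement is the Claim_ definition above) =====
theorem compute_spec : Claim_equal_compute := by
  intro lst _
  unfold Spec_compute compute compute_alt
  dsimp only
  rw [pvScan_eq _ (by
        simpa using PySem.List.sorted_pairwise lst (fun x => x))]
  have hperm : (lst.filter (fun num => pvIsPrime num)).Perm
      ((PySem.List.sorted lst (fun x => x) false).filter (fun num => pvIsPrime num)) :=
    ((PySem.List.sorted_perm lst (fun x => x) false).filter _).symm
  rw [min?_id_perm hperm]
  cases PySem.List.min? ((PySem.List.sorted lst (fun x => x) false).filter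
      (fun num => pvIsPrime num)) (fun x => x) with
  | none => rfl
  | some m => simp [pvWhileDigits_eq]
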